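-- pv_equiv track=rewrite | github.com/matanivas/PoseSlam | code/utils/plot_utils.py | get_frames_length_closest_to_keyframes
-- ===== SOURCE A (Python) =====
-- def get_frames_length_closest_to_keyframes(keyframes_lst, length_seq):
--     pairs_of_len_seq = []
--     idxs = []
--     for i, key_frame in enumerate(keyframes_lst):
--         if i + length_seq >= 3449:
--             break
--         designated_frame = key_frame + length_seq
--         for j in range(i, len(keyframes_lst) - 1):
--             if keyframes_lst[j] <= designated_frame <= keyframes_lst[j + 1]:
--                 if designated_frame - keyframes_lst[j] < keyframes_lst[j + 1] - designated_frame: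
--                     pairs_of_len_seq.append((key_frame, keyframes_lst[j]))
--                     idxs.append((i, j))
--                 else:
--                     pairs_of_len_seq.append((key_frame, keyframes_lst[j + 1]))
--                     idxs.append((i, j + 1))
--                 break
--     return pairs_of_len_seq, idxs
-- ===== SOURCE B (Python) =====
-- def get_frames_length_closest_to_keyframes(keyframes_lst, length_seq):
--     # Offline/inverted traversal: one pass over the consecutive intervals
--     # (keyframes_lst[j], keyframes_lst[j+1]); queries become "pending" when the
--     # interval index reaches them and are resolved at the first interval that
--     # brackets their designated frame; results are emitted sorted by query index.
--     n = len(keyframes_lst)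
--     limit = min(n, max(0, 3449 - length_seq))  # query i is processed iff i < limit
--     pending = []   # (i, designated_frame), i ascending
--     answers = []   # (i, (key_frame, frame), (i, jj)) in resolution order
--     for j in range(n - 1):
--         if j < limit:
--             pending.append((j, keyframes_lst[j] + length_seq))
--         lo, hi = keyframes_lst[j], keyframes_lst[j + 1]
--         still = []
--         for i, d in pending:
--             if lo <= d <= hi:
--                 jj = j if d - lo < hi - d else j + 1
--                 answers.append((i, (keyframes_lst[i], keyframes_lst[jj]), (i, jj)))
--             else:
--                 still.append((i, d))
--         pending = still
--     answers.sort(key=lambda t: t[0])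
--     return [p for _, p, _ in answers], [q for _, _, q in answers]
-- ===== Notes on version B (the rewrite author's own statement) =====
-- stated objective: alternative
-- what changed: A rescans the keyframe-pair list from index i for every query i (nested loops with break); B makes one inverted pass over the consecutive keyframe intervals, resolving a pending-query list offline at the first bracketing interval and emitting the answers sorted by query index.
import Mathlib
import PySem

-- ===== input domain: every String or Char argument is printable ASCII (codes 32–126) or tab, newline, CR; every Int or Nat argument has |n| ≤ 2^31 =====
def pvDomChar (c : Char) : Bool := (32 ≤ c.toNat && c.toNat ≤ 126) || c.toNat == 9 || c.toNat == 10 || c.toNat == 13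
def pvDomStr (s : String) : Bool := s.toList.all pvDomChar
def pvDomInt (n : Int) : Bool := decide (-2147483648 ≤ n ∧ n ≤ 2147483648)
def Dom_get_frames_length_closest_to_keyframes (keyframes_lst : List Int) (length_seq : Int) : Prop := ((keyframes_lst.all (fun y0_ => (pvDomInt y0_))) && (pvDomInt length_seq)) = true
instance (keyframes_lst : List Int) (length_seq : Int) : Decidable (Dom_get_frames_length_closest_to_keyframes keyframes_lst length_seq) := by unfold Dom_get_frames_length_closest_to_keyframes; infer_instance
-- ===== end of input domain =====

-- B replaces A's per-query rescans by a single inverted pass over the consecutive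
-- keyframe intervals that resolves pending queries offline ('alternative' objective);
-- A = B is proved on the whole domain (both functions are total).

-- ===== PORT A =====
-- A's inner 'for j in range(i, len(keyframes_lst) - 1)' scan with its break:
-- first interval bracketing d; returns the chosen frame and its index.
-- all list indices used are in range, so getD is Python's kl[j].
def aScan (kl : List Int) (d : Int) (j : Nat) : Option (Int × Nat) :=
  if _h : j + 1 < kl.length then
    if kl.getD j 0 ≤ d ∧ d ≤ kl.getD (j + 1) 0 then
      if d - kl.getD j 0 < kl.getD (j + 1) 0 - d then some (kl.getD j 0, j)
      else some (kl.getD (j + 1) 0, j + 1)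
    else aScan kl d (j + 1)
  else none
termination_by kl.length - j

-- A's outer 'for i, key_frame in enumerate(...)' with the 'i + length_seq >= 3449' break
def aLoop (kl : List Int) (L : Int) (i : Nat) : (List (Int × Int)) × (List (Int × Int)) :=
  if _h : i < kl.length then
    if 3449 ≤ (i : Int) + L then ([], [])
    else
      match aScan kl (kl.getD i 0 + L) i with
      | some (v, jj) =>
          let rest := aLoop kl L (i + 1)
          ((kl.getD i 0, v) :: rest.1, ((i : Int), (jj : Int)) :: rest.2)
      | none => aLoop kl L (i + 1)
  else ([], [])
termination_by kl.length - i

def get_frames_length_closest_to_keyframes (keyframes_lst : List Int) (length_seq : Int) : (List (Int × Int)) × (List (Int × Int)) :=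
  aLoop keyframes_lst length_seq 0

-- ===== PORT B =====
-- body of B's 'for i, d in pending' loop: try one pending query against interval j
def bInner (kl : List Int) (j : Nat)
    (acc : List (Nat × Int) × List (Nat × ((Int × Int) × (Int × Int))))
    (q : Nat × Int) : List (Nat × Int) × List (Nat × ((Int × Int) × (Int × Int))) :=
  let lo := kl.getD j 0
  let hi := kl.getD (j + 1) 0
  if lo ≤ q.2 ∧ q.2 ≤ hi then
    let jj := if q.2 - lo < hi - q.2 then j else j + 1
    (acc.1, acc.2 ++ [(q.1, ((kl.getD q.1 0, kl.getD jj 0), ((q.1 : Int), (jj : Int))))])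
  else (acc.1 ++ [q], acc.2)

-- body of B's 'for j in range(n - 1)' loop
def bStep (kl : List Int) (limit L : Int)
    (st : List (Nat × Int) × List (Nat × ((Int × Int) × (Int × Int)))) (j : Nat) :
    List (Nat × Int) × List (Nat × ((Int × Int) × (Int × Int))) :=
  let pending := if (j : Int) < limit then st.1 ++ [(j, kl.getD j 0 + L)] else st.1
  pending.foldl (bInner kl j) ([], st.2)

def get_frames_length_closest_to_keyframes_alt (keyframes_lst : List Int) (length_seq : Int) : (List (Int × Int)) × (List (Int × Int)) :=
  let n := keyframes_lst.length
  let limit : Int := min (n : Int) (max 0 (3449 - length_seq))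
  let st := (List.range (n - 1)).foldl (bStep keyframes_lst limit length_seq) ([], [])
  let answers := PySem.List.sorted st.2 (fun t => t.1)
  (answers.map (fun t => t.2.1), answers.map (fun t => t.2.2))

-- ===== PRECONDITION & SPEC =====
def Spec_get_frames_length_closest_to_keyframes (keyframes_lst : List Int) (length_seq : Int) (out : (List (Int × Int)) × (List (Int × Int))) : Prop := out = get_frames_length_closest_to_keyframes_alt keyframes_lst length_seq
instance (keyframes_lst : List Int) (length_seq : Int) (out : (List (Int × Int)) × (List (Int × Int))) : Decidable (Spec_get_frames_length_closest_to_keyframes keyframes_lst length_seq out) := by unfold Spec_get_frames_length_closest_to_keyframes; infer_instance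

-- ===== CLAIM (what is proved, stated in full; the proofs are below) =====
def Claim_equal_get_frames_length_closest_to_keyframes : Prop := ∀ (keyframes_lst : List Int) (length_seq : Int), Dom_get_frames_length_closest_to_keyframes keyframes_lst length_seq → Spec_get_frames_length_closest_to_keyframes keyframes_lst length_seq (get_frames_length_closest_to_keyframes keyframes_lst length_seq)

-- ===== LEMMAS AND PROOFS =====

-- proof-only vocabulary
def condB (kl : List Int) (L : Int) (i j : Nat) : Bool :=
  decide (kl.getD j 0 ≤ kl.getD i 0 + L ∧ kl.getD i 0 + L ≤ kl.getD (j + 1) 0)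

def firstMatch (kl : List Int) (L : Int) (i : Nat) : Option Nat :=
  (List.range' i (kl.length - 1 - i)).find? (condB kl L i)

def ansOf (kl : List Int) (L : Int) (i j : Nat) : Nat × ((Int × Int) × (Int × Int)) :=
  let d := kl.getD i 0 + L
  let jj := if d - kl.getD j 0 < kl.getD (j + 1) 0 - d then j else j + 1
  (i, ((kl.getD i 0, kl.getD jj 0), ((i : Int), (jj : Int))))

def ansF (kl : List Int) (L : Int) (i : Nat) : Nat × ((Int × Int) × (Int × Int)) :=
  ansOf kl L i ((firstMatch kl L i).getD 0)

def predA (kl : List Int) (L : Int) (i : Nat) : Bool :=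
  decide ((i : Int) + L < 3449) && (firstMatch kl L i).isSome

def matched (kl : List Int) (L : Int) : List Nat :=
  (List.range kl.length).filter (predA kl L)

def target (kl : List Int) (L : Int) : List (Nat × ((Int × Int) × (Int × Int))) :=
  (matched kl L).map (ansF kl L)

def limitN (kl : List Int) (L : Int) : Nat := min kl.length (3449 - L).toNat

def noMatchB (kl : List Int) (L : Int) (i j : Nat) : Bool :=
  (List.range' i (j - i)).all (fun j' => ! condB kl L i j')

def pend (kl : List Int) (L : Int) (j : Nat) : List (Nat × Int) :=
  ((List.range (min j (limitN kl L))).filter (fun i => noMatchB kl L i j)).map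
    (fun i => (i, kl.getD i 0 + L))

def keysAt (kl : List Int) (L : Int) (j : Nat) : List Nat :=
  (List.range (min (j + 1) (limitN kl L))).filter (fun i => condB kl L i j && noMatchB kl L i j)

def batch (kl : List Int) (L : Int) (j : Nat) : List (Nat × ((Int × Int) × (Int × Int))) :=
  (keysAt kl L j).map (fun i => ansOf kl L i j)

def cQ (kl : List Int) (j : Nat) (q : Nat × Int) : Bool :=
  decide (kl.getD j 0 ≤ q.2 ∧ q.2 ≤ kl.getD (j + 1) 0)

def gAns (kl : List Int) (j : Nat) (q : Nat × Int) : Nat × ((Int × Int) × (Int × Int)) :=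
  let jj := if q.2 - kl.getD j 0 < kl.getD (j + 1) 0 - q.2 then j else j + 1
  (q.1, ((kl.getD q.1 0, kl.getD jj 0), ((q.1 : Int), (jj : Int))))

lemma aScan_eq (kl : List Int) (d : Int) :
    ∀ (n j : Nat), kl.length - j ≤ n →
    aScan kl d j =
      ((List.range' j (kl.length - 1 - j)).find?
          (fun j' => decide (kl.getD j' 0 ≤ d ∧ d ≤ kl.getD (j' + 1) 0))).map
        (fun j' => if d - kl.getD j' 0 < kl.getD (j' + 1) 0 - d
                   then (kl.getD j' 0, j') else (kl.getD (j' + 1) 0, j' + 1)) := by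
  intro n
  induction n with
  | zero =>
    intro j h
    have hj : ¬ (j + 1 < kl.length) := by omega
    have h0 : kl.length - 1 - j = 0 := by omega
    rw [aScan]
    simp [hj, h0]
  | succ n ih =>
    intro j h
    rw [aScan]
    by_cases hj : j + 1 < kl.length
    · have hk : kl.length - 1 - j = (kl.length - 1 - (j + 1)) + 1 := by omega
      rw [hk, List.range'_succ, List.find?_cons]
      by_cases hc : (kl.getD j 0 ≤ d ∧ d ≤ kl.getD (j + 1) 0)
      · rw [dif_pos hj, if_pos hc, decide_eq_true hc]
        exact (apply_ite some _ _ _).symm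
      · rw [dif_pos hj, if_neg hc, decide_eq_false hc]
        exact ih (j + 1) (by omega)
    · have h0 : kl.length - 1 - j = 0 := by omega
      simp [hj, h0]

lemma aLoop_eq (kl : List Int) (L : Int) :
    ∀ (n i : Nat), kl.length - i ≤ n →
    aLoop kl L i =
      (((List.range' i (kl.length - i)).filter (predA kl L)).map (fun i' => (ansF kl L i').2.1),
       ((List.range' i (kl.length - i)).filter (predA kl L)).map (fun i' => (ansF kl L i').2.2)) := by
  intro n
  induction n with
  | zero =>
    intro i h
    have hi : ¬ (i < kl.length) := by omega
    have h0 : kl.length - i = 0 := by omega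
    rw [aLoop]; simp [hi, h0]
  | succ n ih =>
    intro i h
    rw [aLoop]
    by_cases hi : i < kl.length
    · by_cases hbrk : (3449 : Int) ≤ (i : Int) + L
      · simp only [dif_pos hi, if_pos hbrk]
        have hnil : (List.range' i (kl.length - i)).filter (predA kl L) = [] := by
          rw [List.filter_eq_nil_iff]
          intro a ha
          rw [List.mem_range'_1] at ha
          unfold predA
          simp only [Bool.and_eq_true, decide_eq_true_eq, not_and]
          intro habs
          exfalso; omega
        rw [hnil]; simp
      · have hk : kl.length - i = (kl.length - (i + 1)) + 1 := by omega
        simp only [dif_pos hi, if_neg hbrk]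
        rw [hk, List.range'_succ]
        rw [aScan_eq kl (kl.getD i 0 + L) kl.length i (by omega)]
        have hFM : ((List.range' i (kl.length - 1 - i)).find?
            (fun j' => decide (kl.getD j' 0 ≤ kl.getD i 0 + L ∧ kl.getD i 0 + L ≤ kl.getD (j' + 1) 0)))
            = firstMatch kl L i := rfl
        rw [hFM]
        have hAi : predA kl L i = (firstMatch kl L i).isSome := by
          unfold predA
          simp [show (i : Int) + L < 3449 by omega]
        cases hfm : firstMatch kl L i with
        | none =>
          rw [List.filter_cons_of_neg (by simp [hAi, hfm])]
          simpa using ih (i + 1) (by omega)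
        | some j' =>
          rw [List.filter_cons_of_pos (by simp [hAi, hfm])]
          have hrest := ih (i + 1) (by omega)
          have hansF : ansF kl L i = ansOf kl L i j' := by unfold ansF; rw [hfm]; rfl
          by_cases hlt : kl.getD i 0 + L - kl.getD j' 0 < kl.getD (j' + 1) 0 - (kl.getD i 0 + L)
          · simp only [if_pos hlt, Option.map_some]
            rw [hrest, List.map_cons, List.map_cons, hansF]
            simp only [ansOf, if_pos hlt]
          · simp only [if_neg hlt, Option.map_some]
            rw [hrest, List.map_cons, List.map_cons, hansF]
            simp only [ansOf, if_neg hlt]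
    · have h0 : kl.length - i = 0 := by omega
      simp [hi, h0]

lemma foldl_bInner (kl : List Int) (j : Nat) :
    ∀ (qs : List (Nat × Int)) (s0 : List (Nat × Int)) (a0 : List (Nat × ((Int × Int) × (Int × Int)))),
    qs.foldl (bInner kl j) (s0, a0) =
      (s0 ++ qs.filter (fun q => ! cQ kl j q), a0 ++ (qs.filter (cQ kl j)).map (gAns kl j)) := by
  intro qs
  induction qs with
  | nil => intro s0 a0; simp
  | cons q qs ih =>
    intro s0 a0
    rw [List.foldl_cons]
    by_cases hc : (kl.getD j 0 ≤ q.2 ∧ q.2 ≤ kl.getD (j + 1) 0)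
    · have hb : bInner kl j (s0, a0) q = (s0, a0 ++ [gAns kl j q]) := by
        unfold bInner; rw [if_pos hc]; rfl
      have hct : cQ kl j q = true := decide_eq_true hc
      rw [hb, ih]
      rw [List.filter_cons_of_neg (by simp [hct]), List.filter_cons_of_pos (by simp [hct]),
          List.map_cons]
      simp
    · have hb : bInner kl j (s0, a0) q = (s0 ++ [q], a0) := by
        unfold bInner; rw [if_neg hc]
      have hcf : cQ kl j q = false := decide_eq_false hc
      rw [hb, ih]
      rw [List.filter_cons_of_pos (by simp [hcf]), List.filter_cons_of_neg (by simp [hcf])]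
      simp

lemma limit_iff (kl : List Int) (L : Int) (j : Nat) :
    ((j : Int) < min (kl.length : Int) (max 0 (3449 - L))) ↔ j < limitN kl L := by
  unfold limitN; rw [lt_min_iff, Nat.lt_min]; omega

lemma limitN_iff (kl : List Int) (L : Int) (i : Nat) :
    i < limitN kl L ↔ i < kl.length ∧ (i : Int) + L < 3449 := by
  unfold limitN; rw [Nat.lt_min]; omega

lemma bFold (kl : List Int) (L : Int) :
    ∀ (j : Nat),
    (List.range j).foldl (bStep kl (min (kl.length : Int) (max 0 (3449 - L))) L) ([], []) =
      (pend kl L j, (List.range j).flatMap (batch kl L)) := by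
  have hfm1 : ∀ (l : List Nat) (j : Nat),
      ((l.map (fun i => (i, kl.getD i 0 + L))).filter (fun q => ! cQ kl j q)) =
      (l.filter (fun i => ! condB kl L i j)).map (fun i => (i, kl.getD i 0 + L)) := by
    intro l j
    induction l with
    | nil => rfl
    | cons a t iht =>
      simp only [List.map_cons, List.filter_cons]
      rw [show cQ kl j (a, kl.getD a 0 + L) = condB kl L a j from rfl]
      cases hcb : condB kl L a j
      · simp only [Bool.not_false, if_true, List.map_cons, List.cons.injEq, true_and]
        exact iht
      · simp only [Bool.not_true, Bool.false_eq_true, if_false]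
        exact iht
  have hfm2 : ∀ (l : List Nat) (j : Nat),
      (((l.map (fun i => (i, kl.getD i 0 + L))).filter (cQ kl j)).map (gAns kl j)) =
      (l.filter (fun i => condB kl L i j)).map (fun i => ansOf kl L i j) := by
    intro l j
    induction l with
    | nil => rfl
    | cons a t iht =>
      simp only [List.map_cons, List.filter_cons]
      rw [show cQ kl j (a, kl.getD a 0 + L) = condB kl L a j from rfl]
      cases hcb : condB kl L a j
      · simp only [Bool.false_eq_true, if_false]
        exact iht
      · simp only [if_true, List.map_cons]
        rw [show gAns kl j (a, kl.getD a 0 + L) = ansOf kl L a j from rfl, iht]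
  intro j
  induction j with
  | zero => simp [pend]
  | succ j ih =>
    rw [List.range_succ, List.foldl_append, ih]
    have hstep : ∀ i ∈ List.range (min (j + 1) (limitN kl L)),
        (! condB kl L i j && noMatchB kl L i j) = noMatchB kl L i (j + 1) := by
      intro i hi
      rw [List.mem_range] at hi
      have hij : i ≤ j := by omega
      unfold noMatchB
      have h1 : j + 1 - i = (j - i) + 1 := by omega
      rw [h1, List.range'_concat]
      have h2 : i + 1 * (j - i) = j := by omega
      rw [h2, List.all_append]
      simp [Bool.and_comm]
    simp only [bStep, List.foldl_cons, List.foldl_nil]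
    have hqf : (if ((j : Int) < min (kl.length : Int) (max 0 (3449 - L))) then
          pend kl L j ++ [(j, kl.getD j 0 + L)] else pend kl L j) =
        ((List.range (min (j + 1) (limitN kl L))).filter (fun i => noMatchB kl L i j)).map
          (fun i => (i, kl.getD i 0 + L)) := by
      by_cases hj : j < limitN kl L
      · rw [if_pos ((limit_iff kl L j).mpr hj)]
        unfold pend
        rw [Nat.min_eq_left (by omega), Nat.min_eq_left (by omega), List.range_succ,
            List.filter_append, List.map_append]
        have hone : List.filter (fun i => noMatchB kl L i j) [j] = [j] := by
          simp [noMatchB]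
        rw [hone]
        rfl
      · rw [if_neg (fun hcon => hj ((limit_iff kl L j).mp hcon))]
        unfold pend
        rw [Nat.min_eq_right (by omega), Nat.min_eq_right (by omega)]
    rw [hqf, foldl_bInner, hfm1, hfm2]
    refine Prod.ext ?_ ?_
    · show [] ++ _ = pend kl L (j + 1)
      rw [List.nil_append, List.filter_filter, List.filter_congr hstep]
      rfl
    · show _ = List.flatMap (batch kl L) (List.range j ++ [j])
      rw [List.flatMap_append]
      simp only [List.flatMap_cons, List.flatMap_nil, List.append_nil, List.filter_filter]
      rfl

lemma key_fact (kl : List Int) (L : Int) (i j : Nat) (hj : j < kl.length - 1) :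
    (i < min (j + 1) (limitN kl L) ∧ (condB kl L i j && noMatchB kl L i j) = true) ↔
    (i < limitN kl L ∧ firstMatch kl L i = some j) := by
  constructor
  · rintro ⟨hlt, hb⟩
    rw [Bool.and_eq_true] at hb
    obtain ⟨hcb, hnm⟩ := hb
    have hiL : i < limitN kl L := lt_of_lt_of_le hlt (min_le_right _ _)
    have hij : i ≤ j := by
      have := lt_of_lt_of_le hlt (min_le_left _ _); omega
    refine ⟨hiL, ?_⟩
    unfold firstMatch
    rw [List.find?_range'_eq_some]
    refine ⟨hcb, ?_, ?_⟩
    · rw [List.mem_range'_1]; omega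
    · intro j' hj1 hj2
      unfold noMatchB at hnm
      rw [List.all_eq_true] at hnm
      have := hnm j' (by rw [List.mem_range'_1]; omega)
      simpa using this
  · rintro ⟨hiL, hfm⟩
    unfold firstMatch at hfm
    rw [List.find?_range'_eq_some] at hfm
    obtain ⟨hcb, hmem, hmin⟩ := hfm
    rw [List.mem_range'_1] at hmem
    refine ⟨by omega, ?_⟩
    rw [Bool.and_eq_true]
    refine ⟨hcb, ?_⟩
    unfold noMatchB
    rw [List.all_eq_true]
    intro j' hj'
    rw [List.mem_range'_1] at hj'
    have := hmin j' hj'.1 (by omega)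
    simpa using this

lemma target_perm (kl : List Int) (L : Int) :
    (target kl L).Perm ((List.range (kl.length - 1)).flatMap (batch kl L)) := by
  have hbatch : ∀ j ∈ List.range (kl.length - 1), batch kl L j = (keysAt kl L j).map (ansF kl L) := by
    intro j hj
    rw [List.mem_range] at hj
    unfold batch
    apply List.map_congr_left
    intro i hi
    unfold keysAt at hi
    rw [List.mem_filter, List.mem_range] at hi
    have hkf := (key_fact kl L i j hj).mp ⟨hi.1, hi.2⟩
    unfold ansF
    rw [hkf.2]
    rfl
  have hflat : (List.range (kl.length - 1)).flatMap (batch kl L) =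
      ((List.range (kl.length - 1)).flatMap (keysAt kl L)).map (ansF kl L) := by
    rw [List.map_flatMap]
    exact List.flatMap_congr hbatch
  rw [hflat]
  unfold target
  apply List.Perm.map
  unfold matched
  rw [List.perm_ext_iff_of_nodup ((List.nodup_range).filter _) ?nd]
  case nd =>
    rw [List.nodup_flatMap]
    constructor
    · intro j _; exact (List.nodup_range).filter _
    · have hlt := List.pairwise_lt_range (n := kl.length - 1)
      apply List.Pairwise.imp_of_mem ?_ hlt
      intro j1 j2 h1 h2 hlt12
      rw [List.mem_range] at h1 h2
      intro i hi1 hi2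
      unfold keysAt at hi1 hi2
      rw [List.mem_filter, List.mem_range] at hi1 hi2
      have k1 := (key_fact kl L i j1 h1).mp ⟨hi1.1, hi1.2⟩
      have k2 := (key_fact kl L i j2 h2).mp ⟨hi2.1, hi2.2⟩
      rw [k1.2] at k2
      have : j1 = j2 := by injection k2.2
      omega
  intro i
  unfold predA
  rw [List.mem_filter, List.mem_range, List.mem_flatMap]
  constructor
  · rintro ⟨hin, hp⟩
    rw [Bool.and_eq_true, decide_eq_true_eq, Option.isSome_iff_exists] at hp
    obtain ⟨hL, j, hfm⟩ := hp
    have hjlt : j < kl.length - 1 := by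
      have hfm' : (List.range' i (kl.length - 1 - i)).find? (condB kl L i) = some j := hfm
      have hmem := List.mem_of_find?_eq_some hfm'
      rw [List.mem_range'_1] at hmem
      omega
    refine ⟨j, by rw [List.mem_range]; exact hjlt, ?_⟩
    unfold keysAt
    rw [List.mem_filter, List.mem_range]
    have hiL : i < limitN kl L := by rw [limitN_iff]; exact ⟨hin, hL⟩
    have := (key_fact kl L i j hjlt).mpr ⟨hiL, hfm⟩
    exact ⟨this.1, this.2⟩
  · rintro ⟨j, hjr, hik⟩
    rw [List.mem_range] at hjr
    unfold keysAt at hik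
    rw [List.mem_filter, List.mem_range] at hik
    have hkf := (key_fact kl L i j hjr).mp ⟨hik.1, hik.2⟩
    have hiL := hkf.1
    rw [limitN_iff] at hiL
    refine ⟨hiL.1, ?_⟩
    rw [Bool.and_eq_true, decide_eq_true_eq]
    exact ⟨hiL.2, by rw [hkf.2]; rfl⟩

lemma target_pairwise (kl : List Int) (L : Int) :
    (target kl L).Pairwise (fun a b => a.1 < b.1) := by
  unfold target
  rw [List.pairwise_map]
  apply List.Pairwise.imp ?_ ((List.pairwise_lt_range).filter _)
  intro a b hab
  exact hab

-- ===== VERDICT (by name: the statement is the Claim_ definition above) =====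
theorem get_frames_length_closest_to_keyframes_spec : Claim_equal_get_frames_length_closest_to_keyframes := by
  intro kl L _hdom
  unfold Spec_get_frames_length_closest_to_keyframes
  unfold get_frames_length_closest_to_keyframes
  rw [aLoop_eq kl L kl.length 0 (by omega)]
  rw [show List.range' 0 (kl.length - 0) = List.range kl.length from by
    simp [List.range_eq_range']]
  simp only [get_frames_length_closest_to_keyframes_alt]
  rw [bFold kl L (kl.length - 1)]
  have hsort : PySem.List.sorted
      ((pend kl L (kl.length - 1), (List.range (kl.length - 1)).flatMap (batch kl L)).2)
      (fun t => t.1) = target kl L :=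
    PySem.List.sorted_eq_of_perm_of_pairwise_lt _ _ _ (target_perm kl L) (target_pairwise kl L)
  rw [hsort]
  unfold target matched
  rw [List.map_map, List.map_map]
  rfl
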